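-- pv_equiv track=rewrite | github.com/silvioiatech/Umbra | umbra/modules/swiss_accountant/ingest/qr_bill.py | _validate_mod10_checksum
-- ===== SOURCE A (Python) =====
-- def _validate_mod10_checksum(number: str) -> bool:
--     """Validate mod-10 checksum (for QR references)."""
--     try:
--         digits = [int(d) for d in number]
--         carry = 0
--
--         for digit in digits:
--             carry = (carry + digit) % 10
--             carry = (carry * 2) % 10
--             if carry >= 10:
--                 carry = (carry % 10) + 1
--
--         return carry == 0
--
--     except (ValueError, TypeError):
--         return False
-- ===== SOURCE B (Python) =====
-- def _validate_mod10_checksum(number: str) -> bool: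
--     """Validate mod-10 checksum via closed-form positional weights [2,4,8,6] from the right."""
--     try:
--         total = 0
--         for i, ch in enumerate(reversed(number)):
--             total += int(ch) * (2, 4, 8, 6)[i % 4]
--         return total % 10 == 0
--     except (ValueError, TypeError):
--         return False
-- ===== Notes on version B (the rewrite author's own statement) =====
-- stated objective: alternative
-- what changed: Replaced the stateful carry recurrence carry=(2*(carry+d))%10 with its closed form: a single weighted sum over the reversed digits with the period-4 weight cycle [2,4,8,6], testing total % 10 == 0.
import Mathlib
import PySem

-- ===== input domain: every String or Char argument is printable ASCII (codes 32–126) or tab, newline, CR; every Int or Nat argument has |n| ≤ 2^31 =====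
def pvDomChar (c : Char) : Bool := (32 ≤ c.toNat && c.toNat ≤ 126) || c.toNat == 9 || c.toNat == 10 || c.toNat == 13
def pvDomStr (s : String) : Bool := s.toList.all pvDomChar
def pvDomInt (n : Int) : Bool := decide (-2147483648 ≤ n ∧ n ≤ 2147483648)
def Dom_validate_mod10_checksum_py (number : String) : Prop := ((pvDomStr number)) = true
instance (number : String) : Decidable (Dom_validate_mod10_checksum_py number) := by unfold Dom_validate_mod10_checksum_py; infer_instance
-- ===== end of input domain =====

-- B replaces A's stateful carry recurrence by its closed form: a single weighted sum over the
-- reversed digits with the period-4 weight cycle [2,4,8,6] (objective: alternative, same cost).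

-- ===== PORT A =====
-- literal port of A: digits = [int(d) for d in number]; carry loop; ValueError -> False
def validate_mod10_checksum_py (number : String) : Bool :=
  match number.toList.mapM (fun d => PySem.Int.ofChars? [d]) with
  | none => false
  | some digits =>
      (digits.foldl (fun carry digit =>
        let c1 := PySem.Int.mod (carry + digit) 10
        let c2 := PySem.Int.mod (c1 * 2) 10
        if 10 ≤ c2 then PySem.Int.mod c2 10 + 1 else c2) 0) == 0

-- ===== PORT B =====
def pvWeights : List Int := [2, 4, 8, 6]
-- (2, 4, 8, 6)[i % 4]
def pvW (i : Int) : Int := PySem.List.pyGetD pvWeights (PySem.Int.mod i 4) 0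

-- literal port of B: enumerate(reversed(number)), total += int(ch) * (2,4,8,6)[i%4]; ValueError -> False
def validate_mod10_checksum_py_alt (number : String) : Bool :=
  match number.toList.reverse.mapM (fun ch => PySem.Int.ofChars? [ch]) with
  | none => false
  | some ds =>
      let total := (PySem.List.enumerate ds).foldl (fun t p => t + p.2 * pvW p.1) 0
      PySem.Int.mod total 10 == 0

-- ===== PRECONDITION & SPEC =====
def Spec_validate_mod10_checksum_py (number : String) (out : Bool) : Prop := out = validate_mod10_checksum_py_alt number
instance (number : String) (out : Bool) : Decidable (Spec_validate_mod10_checksum_py number out) := by unfold Spec_validate_mod10_checksum_py; infer_instance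

-- ===== CLAIM (what is proved, stated in full; the proofs are below) =====
def Claim_equal_validate_mod10_checksum_py : Prop := ∀ (number : String), Dom_validate_mod10_checksum_py number → Spec_validate_mod10_checksum_py number (validate_mod10_checksum_py number)

-- ===== LEMMAS AND PROOFS =====

-- reversing the iterated string commutes with the digit conversion (Option monad)
theorem pv_mapM_rev (g : Char → Option Int) (l : List Char) :
    l.reverse.mapM g = (l.mapM g).map List.reverse := by
  induction l with
  | nil => rfl
  | cons y t ih =>
    cases hy : g y <;> simp [List.mapM_cons, hy, ih]; cases t.mapM g <;> simp

-- reference value: V r = Σ r[i] * 2^(i+1) (recursively), the closed form both programs compute mod 10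
def pvV : List Int → Int
  | [] => 0
  | d :: t => 2 * d + 2 * pvV t

-- A's one loop step equals 2*(carry+digit) mod 10 (the `if` branch is dead: mod 10 < 10)
theorem pv_stepA (c d : Int) :
    (let c1 := PySem.Int.mod (c + d) 10
     let c2 := PySem.Int.mod (c1 * 2) 10
     if 10 ≤ c2 then PySem.Int.mod c2 10 + 1 else c2) = (2 * (c + d)) % 10 := by
  have e : ∀ a : Int, PySem.Int.mod a 10 = a % 10 :=
    fun a => PySem.Int.mod_eq_emod_of_pos (by norm_num)
  simp only [e]
  split_ifs with h <;> omega

-- A's fold over r.reverse is the closed form mod 10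
theorem pv_foldA (r : List Int) (c : Int) (h0 : 0 ≤ c) (h10 : c < 10) :
    r.reverse.foldl (fun carry digit =>
        let c1 := PySem.Int.mod (carry + digit) 10
        let c2 := PySem.Int.mod (c1 * 2) 10
        if 10 ≤ c2 then PySem.Int.mod c2 10 + 1 else c2) c = (pvV r + c * 2 ^ r.length) % 10 := by
  induction r generalizing c with
  | nil => simp [pvV]; omega
  | cons d t ih =>
    simp only [List.reverse_cons, List.foldl_append, List.foldl_cons, List.foldl_nil]
    rw [ih c h0 h10, pv_stepA]
    have : 2 * ((pvV t + c * 2 ^ t.length) % 10 + d) % 10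
        = (2 * (pvV t + c * 2 ^ t.length) + 2 * d) % 10 := by omega
    rw [this]
    simp only [pvV, List.length_cons, pow_succ]
    ring_nf

-- weight doubling: w(k+1) ≡ 2*w(k)  (mod 10), for 0 ≤ k
theorem pv_w_succ (k : Int) (_hk : 0 ≤ k) : pvW (k + 1) % 10 = (2 * pvW k) % 10 := by
  have h4 : PySem.Int.mod k 4 = k % 4 := PySem.Int.mod_eq_emod_of_pos (by norm_num)
  have h4' : PySem.Int.mod (k + 1) 4 = (k + 1) % 4 := PySem.Int.mod_eq_emod_of_pos (by norm_num)
  have : k % 4 = 0 ∨ k % 4 = 1 ∨ k % 4 = 2 ∨ k % 4 = 3 := by omega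
  rcases this with h | h | h | h <;>
    · have h1 : (k + 1) % 4 = (k % 4 + 1) % 4 := by omega
      simp only [pvW, h4, h4', h1, h]; decide

-- B's enumerate-fold from index k+1 is c plus w(k) times the closed form, mod 10
theorem pv_foldB (r : List Int) (k c : Int) (hk : 0 ≤ k) :
    ((PySem.List.enumerate r (k + 1)).foldl (fun t p => t + p.2 * pvW p.1) c) % 10
      = (c + pvW k * pvV r) % 10 := by
  induction r generalizing k c with
  | nil => simp [PySem.List.enumerate, pvV]
  | cons d t ih =>
    rw [PySem.List.enumerate_cons, List.foldl_cons]
    have hrec := ih (k + 1) (c + d * pvW (k + 1)) (by omega)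
    rw [hrec]
    have hw := pv_w_succ k hk
    simp only [pvV]
    have e1 : pvW (k + 1) % 10 = (2 * pvW k) % 10 := hw
    -- reduce everything to congruences mod 10
    have h1 : (c + d * pvW (k + 1) + pvW (k + 1) * pvV t) % 10
        = (c + d * (2 * pvW k) + (2 * pvW k) * pvV t) % 10 := by
      conv_lhs => rw [Int.add_emod, Int.add_emod c, Int.mul_emod d, Int.mul_emod (pvW (k+1))]
      conv_rhs => rw [Int.add_emod, Int.add_emod c, Int.mul_emod d, Int.mul_emod (2 * pvW k)]
      rw [e1]
    rw [h1]; ring_nf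

-- ===== VERDICT (by name: the statement is the Claim_ definition above) =====
theorem validate_mod10_checksum_py_spec : Claim_equal_validate_mod10_checksum_py := by
  intro number _
  unfold Spec_validate_mod10_checksum_py validate_mod10_checksum_py validate_mod10_checksum_py_alt
  rw [pv_mapM_rev]
  cases hm : number.toList.mapM (fun d => PySem.Int.ofChars? [d]) with
  | none => rfl
  | some digits =>
    simp only [Option.map_some]
    set r := digits.reverse with hr
    have hdr : digits = r.reverse := by simp [hr]
    rw [hdr, pv_foldA r 0 le_rfl (by norm_num)]
    have hB : ((PySem.List.enumerate r).foldl (fun t p => t + p.2 * pvW p.1) 0) % 10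
        = pvV r % 10 := by
      cases r with
      | nil => simp [PySem.List.enumerate, pvV]
      | cons d t =>
        simp only [PySem.List.enumerate_cons, List.foldl_cons]
        rw [pv_foldB t 0 _ le_rfl]
        have hw0 : pvW 0 = 2 := by decide
        simp [pvV, hw0]
        ring_nf
    have hmod : PySem.Int.mod ((PySem.List.enumerate r).foldl (fun t p => t + p.2 * pvW p.1) 0) 10
        = ((PySem.List.enumerate r).foldl (fun t p => t + p.2 * pvW p.1) 0) % 10 :=
      PySem.Int.mod_eq_emod_of_pos (by norm_num)
    rw [hmod, hB]
    simp
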